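-- pv_equiv track=rewrite | github.com/qifanyyy/JupyterNotebook | new_algs/Number+theoretic+algorithms/Euclidean+algorithm/musical_rythms.py | spaces_vector
-- ===== SOURCE A (Python) =====
-- def spaces_vector(r):
--
--     """#Creates the rhythm in the form of a space vector, by counting the spaces between each pulse(1).
--     #Returns a list of the spaces(vector)."""
--     list_vector=[]
--     #str_vector="("
--     counter=0
--     for i in range(0, len(r)):
--         if r[i]=="1":
--             if counter>0:
--                 list_vector.append(counter)
--             counter=0
--         counter+=1
--     list_vector.append(counter)
--     return list_vector
-- ===== SOURCE B (Python) =====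
-- def spaces_vector(r):
--     pos = [i for i, c in enumerate(r) if c == "1"]
--     if not pos:
--         return [len(r)]
--     out = [pos[0]] if pos[0] > 0 else []
--     out += [b - a for a, b in zip(pos, pos[1:])]
--     out.append(len(r) - pos[-1])
--     return out
-- ===== Notes on version B (the rewrite author's own statement) =====
-- stated objective: alternative
-- what changed: B replaces A's running counter with resets by a positions-then-differences decomposition: collect the indices of all '1' characters, then emit the first index (if positive), the consecutive differences, and the trailing gap len(r)-pos[-1].
import Mathlib
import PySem

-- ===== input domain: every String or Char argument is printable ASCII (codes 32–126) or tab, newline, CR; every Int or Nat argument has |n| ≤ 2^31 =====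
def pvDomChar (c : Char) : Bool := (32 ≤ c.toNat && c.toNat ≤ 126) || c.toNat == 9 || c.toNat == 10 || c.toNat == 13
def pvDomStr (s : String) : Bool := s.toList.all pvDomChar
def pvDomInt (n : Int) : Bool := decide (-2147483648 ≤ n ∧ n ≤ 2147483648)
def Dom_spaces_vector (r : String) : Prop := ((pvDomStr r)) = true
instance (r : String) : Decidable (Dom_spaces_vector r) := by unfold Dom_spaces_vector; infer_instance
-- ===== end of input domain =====

-- B replaces A's running counter with resets by a positions-then-differences decomposition
-- (indices of the '1' pulses, then consecutive gaps); alternative decomposition, same O(n) cost.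

-- ===== PORT A =====
-- the for-loop over range(0, len(r)) reading r[i] is ported as a fold over the characters
-- of r in order, with the same (list_vector, counter) state
def spaces_vector (r : String) : List Int :=
  let st := r.toList.foldl
    (fun (st : List Int × Int) c =>
      let lv := st.1
      let counter := st.2
      let st' : List Int × Int :=
        if c = '1' then
          (if counter > 0 then lv ++ [counter] else lv, 0)
        else (lv, counter)
      (st'.1, st'.2 + 1))
    ([], 0)
  st.1 ++ [st.2]

-- ===== PORT B =====
def spaces_vector_alt (r : String) : List Int :=
  let cs := r.toList
  let pos : List Int :=
    (PySem.List.enumerate cs 0).filterMap (fun p => if p.2 = '1' then some p.1 else none)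
  match pos with
  | [] => [(cs.length : Int)]
  | p0 :: rest =>
      (if p0 > 0 then [p0] else [])
        ++ List.zipWith (fun a b => b - a) (p0 :: rest) rest
        ++ [(cs.length : Int) - (p0 :: rest).getLastD 0]

-- ===== PRECONDITION & SPEC =====
def Spec_spaces_vector (r : String) (out : List Int) : Prop := out = spaces_vector_alt r
instance (r : String) (out : List Int) : Decidable (Spec_spaces_vector r out) := by unfold Spec_spaces_vector; infer_instance

-- ===== CLAIM (what is proved, stated in full; the proofs are below) =====
def Claim_equal_spaces_vector : Prop := ∀ (r : String), Dom_spaces_vector r → Spec_spaces_vector r (spaces_vector r)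

-- ===== LEMMAS AND PROOFS =====

-- reference recursion: A's loop body on remaining characters, with current counter c
def pvCore (cs : List Char) (c : Int) : List Int :=
  match cs with
  | [] => [c]
  | x :: cs => if x = '1' then (if c > 0 then [c] else []) ++ pvCore cs 1 else pvCore cs (c + 1)

-- positions of '1' in cs, with index offset
def pvPos (cs : List Char) (off : Int) : List Int :=
  match cs with
  | [] => []
  | x :: cs => (if x = '1' then [off] else []) ++ pvPos cs (off + 1)

-- gaps rebuilt from positions: previous pulse position prev, end index endv
def pvBuild (pos : List Int) (prev endv : Int) : List Int :=
  match pos with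
  | [] => [endv - prev]
  | q :: qs => (if q - prev > 0 then [q - prev] else []) ++ pvBuild qs q endv

theorem pvFoldl_eq_core (cs : List Char) : ∀ (lv : List Int) (c : Int),
    (let st := cs.foldl
      (fun (st : List Int × Int) ch =>
        let lv := st.1
        let counter := st.2
        let st' : List Int × Int :=
          if ch = '1' then
            (if counter > 0 then lv ++ [counter] else lv, 0)
          else (lv, counter)
        (st'.1, st'.2 + 1))
      (lv, c)
     st.1 ++ [st.2]) = lv ++ pvCore cs c := by
  induction cs with
  | nil => intro lv c; simp [pvCore]
  | cons x cs ih =>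
      intro lv c
      by_cases hx : x = '1'
      · by_cases hc : c > 0 <;>
          simp [List.foldl_cons, hx, hc, pvCore, ih, List.append_assoc]
      · simp [List.foldl_cons, hx, pvCore, ih]

theorem pvCore_eq_build (cs : List Char) : ∀ (off prev : Int),
    pvCore cs (off - prev) = pvBuild (pvPos cs off) prev (off + cs.length) := by
  induction cs with
  | nil => intro off prev; simp [pvCore, pvPos, pvBuild]
  | cons x cs ih =>
      intro off prev
      by_cases hx : x = '1'
      · have h1 : (1 : Int) = (off + 1) - off := by ring
        simp only [pvCore, pvPos, hx, List.length_cons]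
        rw [h1, ih (off + 1) off]
        simp [pvBuild]
        ring_nf
      · have h1 : off - prev + 1 = (off + 1) - prev := by ring
        simp only [pvCore, pvPos, hx, List.length_cons]
        rw [h1, ih (off + 1) prev]
        simp
        ring_nf

theorem pvPos_chain (cs : List Char) : ∀ (off p : Int), p < off →
    List.IsChain (· < ·) (p :: pvPos cs off) := by
  induction cs with
  | nil => intro off p _; simp [pvPos]
  | cons x cs ih =>
      intro off p hp
      by_cases hx : x = '1'
      · simp only [pvPos, hx, List.singleton_append, if_pos]
        exact List.IsChain.cons_cons hp (ih (off + 1) off (by omega))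
      · simp only [pvPos, hx, List.nil_append, reduceIte]
        exact ih (off + 1) p (by omega)

theorem pvBuild_eq (rest : List Int) : ∀ (p0 prev endv : Int),
    List.IsChain (· < ·) (p0 :: rest) →
    pvBuild (p0 :: rest) prev endv =
      (if p0 - prev > 0 then [p0 - prev] else [])
        ++ List.zipWith (fun a b => b - a) (p0 :: rest) rest
        ++ [endv - (p0 :: rest).getLastD 0] := by
  induction rest with
  | nil => intro p0 prev endv _; simp [pvBuild]
  | cons q qs ih =>
      intro p0 prev endv hch
      obtain ⟨hlt, hch'⟩ := List.isChain_cons_cons.mp hch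
      show (if p0 - prev > 0 then [p0 - prev] else []) ++ pvBuild (q :: qs) p0 endv = _
      rw [ih q p0 endv hch']
      simp [hlt, List.zipWith, List.append_assoc]

theorem pvPos_eq_filterMap (cs : List Char) : ∀ (off : Int),
    (PySem.List.enumerate cs off).filterMap (fun p => if p.2 = '1' then some p.1 else none)
      = pvPos cs off := by
  induction cs with
  | nil => intro off; simp [pvPos, PySem.List.enumerate_nil]
  | cons x cs ih =>
      intro off
      by_cases hx : x = '1' <;>
        simp [PySem.List.enumerate_cons, hx, pvPos, ih]

-- ===== VERDICT (by name: the statement is the Claim_ definition above) =====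
theorem spaces_vector_spec : Claim_equal_spaces_vector := by
  intro r _
  unfold Spec_spaces_vector
  have hA : spaces_vector r = pvBuild (pvPos r.toList 0) 0 (r.toList.length : Int) := by
    unfold spaces_vector
    rw [pvFoldl_eq_core r.toList [] 0, List.nil_append]
    simpa using pvCore_eq_build r.toList 0 0
  rw [hA]
  unfold spaces_vector_alt
  simp only [pvPos_eq_filterMap]
  cases hpos : pvPos r.toList 0 with
  | nil => simp [pvBuild]
  | cons p0 rest =>
      have hch : List.IsChain (· < ·) (p0 :: rest) := by
        have h := pvPos_chain r.toList 0 (-1) (by norm_num)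
        rw [hpos] at h
        exact h.tail
      rw [pvBuild_eq rest p0 0 _ hch]
      simp
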